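-- pv_equiv track=rewrite | github.com/leesunyong/BaekJoon | 10001~20000/15686/solution.py | solution
-- ===== SOURCE A (Python) =====
-- from itertools import combinations
--
-- def solution(M, house, chicken):
--     cDis = [[abs(h[0] - c[0]) + abs(h[1] - c[1]) for c in chicken] for h in house]
--
--     cityDis = 2500
--     for i in combinations((j for j in range(len(chicken))), M):
--         dis = 0
--         for k in range(len(cDis)):
--             dis += min([cDis[k][c] for c in i])
--         cityDis = min(cityDis, dis)
--
--     return cityDis
-- ===== SOURCE B (Python) =====
-- def solution(M, house, chicken):
--     best = 2500
--
--     def cost(chosen):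
--         return sum(min(abs(h[0] - c[0]) + abs(h[1] - c[1]) for c in chosen)
--                    for h in house)
--
--     def go(rest, need, chosen):
--         nonlocal best
--         if need == 0:
--             best = min(best, cost(chosen))
--             return
--         if len(rest) < need:
--             return
--         go(rest[1:], need - 1, chosen + [rest[0]])
--         go(rest[1:], need, chosen)
--
--     if 0 <= M <= len(chicken):
--         go(chicken, M, [])
--     return best
-- ===== Notes on version B (the rewrite author's own statement) =====
-- stated objective: simpler
-- what changed: Drops the precomputed house-by-chicken distance matrix and the itertools index-combination scan; B enumerates M-subsets of the chicken list itself by direct choose/skip recursion, computing each subset's distances on the fly (and never touches the data when no M-subset exists).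
import Mathlib
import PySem

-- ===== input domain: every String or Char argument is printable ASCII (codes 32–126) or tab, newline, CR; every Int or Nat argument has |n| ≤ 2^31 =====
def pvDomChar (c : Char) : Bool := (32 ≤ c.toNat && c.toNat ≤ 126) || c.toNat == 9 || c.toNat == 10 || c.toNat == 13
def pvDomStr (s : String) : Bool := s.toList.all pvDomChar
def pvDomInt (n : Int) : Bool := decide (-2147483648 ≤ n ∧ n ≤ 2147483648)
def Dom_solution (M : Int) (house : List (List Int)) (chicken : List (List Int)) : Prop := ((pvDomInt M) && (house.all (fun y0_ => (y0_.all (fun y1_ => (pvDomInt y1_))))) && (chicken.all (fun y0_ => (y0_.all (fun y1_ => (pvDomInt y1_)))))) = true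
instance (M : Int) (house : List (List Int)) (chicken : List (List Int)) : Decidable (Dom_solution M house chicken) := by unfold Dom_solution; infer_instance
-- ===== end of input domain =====

-- B drops A's precomputed house×chicken distance table and index-combination scan, enumerating
-- M-subsets of the chicken list directly by choose/skip recursion (objective: simpler).

-- ===== PORT A =====
-- itertools.combinations(xs, r), in itertools' lexicographic emission order
def pyCombos {α : Type} : Nat → List α → List (List α)
  | 0, _ => [[]]
  | _ + 1, [] => []
  | r + 1, x :: xs => (pyCombos r xs).map (fun s => x :: s) ++ pyCombos (r + 1) xs

-- min(list) ; [] is Python's ValueError, unreachable under Pre_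
def minA : List Int → Int
  | [] => 0
  | x :: xs => xs.foldl min x

-- all indexing below is nonnegative and (under Pre_) in range, so List.getD is exact
def solution (M : Int) (house : List (List Int)) (chicken : List (List Int)) : Int :=
  let cDis := house.map (fun h => chicken.map (fun c =>
    |h.getD 0 0 - c.getD 0 0| + |h.getD 1 0 - c.getD 1 0|))
  (pyCombos M.toNat (List.range chicken.length)).foldl
    (fun cityDis i =>
      min cityDis
        ((List.range cDis.length).foldl
          (fun dis k => dis + minA (i.map (fun c => (cDis.getD k []).getD c 0))) 0))
    2500

-- ===== PORT B =====
def minB : List Int → Int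
  | [] => 0
  | x :: xs => xs.foldl min x

def costB (house chosen : List (List Int)) : Int :=
  house.foldl (fun acc h => acc + minB (chosen.map (fun c =>
    |h.getD 0 0 - c.getD 0 0| + |h.getD 1 0 - c.getD 1 0|))) 0

def goB (house : List (List Int)) (rest : List (List Int)) (need : Nat)
    (chosen : List (List Int)) (best : Int) : Int :=
  if need = 0 then min best (costB house chosen)
  else if rest.length < need then best
  else match rest with
    | [] => best
    | r :: rs => goB house rs need chosen (goB house rs (need - 1) (chosen ++ [r]) best)
termination_by rest.length
decreasing_by all_goals simp_all

def solution_alt (M : Int) (house : List (List Int)) (chicken : List (List Int)) : Int :=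
  if 0 ≤ M ∧ M ≤ (chicken.length : Int) then goB house chicken M.toNat [] 2500 else 2500

-- ===== PRECONDITION & SPEC =====
-- Pre_ excludes exactly the inputs where Python A raises: M < 0 (ValueError from combinations),
-- M = 0 with a nonempty house (min of an empty list), and rows of length < 2 that A actually
-- indexes (IndexError): house rows are indexed only when chicken is nonempty, chicken rows only
-- when house is nonempty.
def Pre_solution (M : Int) (house : List (List Int)) (chicken : List (List Int)) : Prop :=
  0 ≤ M ∧ (M = 0 → house = []) ∧
  (chicken ≠ [] → ∀ h ∈ house, 2 ≤ h.length) ∧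
  (house ≠ [] → ∀ c ∈ chicken, 2 ≤ c.length)
instance (M : Int) (house : List (List Int)) (chicken : List (List Int)) : Decidable (Pre_solution M house chicken) := by unfold Pre_solution; infer_instance

def pvWitness_solution : Int × List (List Int) × List (List Int) := (1, [[0, 0]], [[1, 1]])

def Spec_solution (M : Int) (house : List (List Int)) (chicken : List (List Int)) (out : Int) : Prop := out = solution_alt M house chicken
instance (M : Int) (house : List (List Int)) (chicken : List (List Int)) (out : Int) : Decidable (Spec_solution M house chicken out) := by unfold Spec_solution; infer_instance

-- ===== CLAIM (what is proved, stated in full; the proofs are below) =====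
def Claim_equal_solution : Prop := ∀ (M : Int) (house : List (List Int)) (chicken : List (List Int)), Dom_solution M house chicken → Pre_solution M house chicken → Spec_solution M house chicken (solution M house chicken)

-- ===== LEMMAS AND PROOFS =====

lemma minA_eq_minB (l : List Int) : minA l = minB l := by
  cases l <;> rfl

lemma pyCombos_eq_nil {α : Type} (r : Nat) (xs : List α) (h : xs.length < r) :
    pyCombos r xs = [] := by
  induction xs generalizing r with
  | nil =>
    match r with
    | 0 => simp at h
    | r + 1 => rfl
  | cons x xs ih =>
    match r with
    | 0 => simp at h
    | r + 1 =>
      simp only [pyCombos]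
      rw [ih r (by simpa using h), ih (r + 1) (by simp at h; omega)]
      simp

lemma mem_pyCombos {α : Type} {r : Nat} {xs s : List α} (hs : s ∈ pyCombos r xs) :
    ∀ a ∈ s, a ∈ xs := by
  induction xs generalizing r s with
  | nil =>
    match r with
    | 0 => simp [pyCombos] at hs; simp [hs]
    | r + 1 => simp [pyCombos] at hs
  | cons x xs ih =>
    match r with
    | 0 =>
      simp [pyCombos] at hs; simp [hs]
    | r + 1 =>
      simp only [pyCombos, List.mem_append, List.mem_map] at hs
      rcases hs with ⟨t, ht, rfl⟩ | hs
      · intro a ha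
        rcases List.mem_cons.mp ha with rfl | ha
        · exact List.mem_cons_self
        · exact List.mem_cons_of_mem _ (ih ht a ha)
      · intro a ha
        exact List.mem_cons_of_mem _ (ih hs a ha)

lemma pyCombos_map {α β : Type} (f : α → β) (r : Nat) (xs : List α) :
    pyCombos r (xs.map f) = (pyCombos r xs).map (List.map f) := by
  induction xs generalizing r with
  | nil =>
    match r with
    | 0 => rfl
    | r + 1 => rfl
  | cons x xs ih =>
    match r with
    | 0 => rfl
    | r + 1 =>
      simp only [List.map_cons, pyCombos, ih, List.map_append, List.map_map]
      rfl

lemma map_getD_range {α : Type} (l : List α) (d : α) :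
    (List.range l.length).map (fun i => l.getD i d) = l := by
  apply List.ext_getElem
  · simp
  · intro i h1 h2
    simp [List.getElem?_eq_getElem h2]

lemma foldl_range_getD {α β : Type} (l : List α) (d : α) (g : β → α → β) (a : β) :
    (List.range l.length).foldl (fun acc k => g acc (l.getD k d)) a = l.foldl g a := by
  conv_rhs => rw [← map_getD_range l d]
  rw [List.foldl_map]

lemma goB_eq (house : List (List Int)) (rest : List (List Int)) (need : Nat)
    (chosen : List (List Int)) (best : Int) :
    goB house rest need chosen best =
      (pyCombos need rest).foldl (fun b s => min b (costB house (chosen ++ s))) best := by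
  induction rest generalizing need chosen best with
  | nil =>
    match need with
    | 0 => simp [goB, pyCombos]
    | need + 1 => simp [goB, pyCombos]
  | cons r rs ih =>
    match need with
    | 0 => simp [goB, pyCombos]
    | need + 1 =>
      rw [goB]
      simp only [Nat.add_one_ne_zero, if_false]
      by_cases hlen : (r :: rs).length < need + 1
      · rw [if_pos hlen, pyCombos_eq_nil _ _ hlen]
        rfl
      · rw [if_neg hlen]
        simp only [pyCombos, List.foldl_append, List.foldl_map, Nat.add_sub_cancel]
        rw [ih, ih]
        congr 1
        apply PySem.List.foldl_congr_mem
        intro b s _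
        simp

-- ===== VERDICT (by name: the statement is the Claim_ definition above) =====
theorem solution_spec : Claim_equal_solution := by
  intro M house chicken _ hPre
  obtain ⟨hM0, _, _, _⟩ := hPre
  unfold Spec_solution solution solution_alt
  simp only []
  by_cases hle : M ≤ (chicken.length : Int)
  · rw [if_pos ⟨hM0, hle⟩, goB_eq]
    -- rewrite chicken as (range n).map lookup on the B side
    conv_rhs => rw [show chicken = (List.range chicken.length).map (fun i => chicken.getD i []) from (map_getD_range chicken []).symm]
    rw [pyCombos_map, List.foldl_map]
    apply PySem.List.foldl_congr_mem
    intro acc i hi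
    congr 1
    -- inner: A's range-indexed sum over cDis = costB over looked-up chosen rows
    have hmem : ∀ c ∈ i, c < chicken.length := by
      intro c hc
      have := mem_pyCombos hi c hc
      simpa using this
    rw [foldl_range_getD (house.map (fun h => chicken.map (fun c =>
          |h.getD 0 0 - c.getD 0 0| + |h.getD 1 0 - c.getD 1 0|))) []
        (fun dis row => dis + minA (i.map (fun c => row.getD c 0))) 0,
      List.foldl_map]

    unfold costB
    simp only [List.nil_append]
    apply PySem.List.foldl_congr_mem
    intro acc h _
    congr 1
    rw [minA_eq_minB]
    congr 1
    rw [List.map_map]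
    apply List.map_congr_left
    intro c hc
    have hlt := hmem c hc
    simp [List.getElem?_eq_getElem hlt]
  · rw [if_neg (by tauto)]
    rw [pyCombos_eq_nil M.toNat (List.range chicken.length) (by simp; omega)]
    rfl
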